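-- pv_equiv track=rewrite | github.com/ItBeCharlie/SentenceValidity | underlinks.py | get_middle_str_indexes
-- ===== SOURCE A (Python) =====
-- def get_middle_str_indexes(sentence, gap=3):
--     total_length = 0
--     out = []
--     for token in sentence:
--         mid = len(token) // 2
--         out.append(total_length + mid)
--         total_length += gap + len(token)
--     return out
-- ===== SOURCE B (Python) =====
-- def get_middle_str_indexes(sentence, gap=3):
--     # Build the table of token start offsets (excluding gaps) first,
--     # then map over it; the i-th token starts at starts[i] + i*gap.
--     starts = [0] * (len(sentence) + 1)
--     for i, token in enumerate(sentence):
--         starts[i + 1] = starts[i] + len(token)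
--     return [starts[i] + i * gap + len(token) // 2 for i, token in enumerate(sentence)]
-- ===== Notes on version B (the rewrite author's own statement) =====
-- stated objective: alternative
-- what changed: Replaces A's fused accumulate-and-append loop with a prefix-offset table of token starts built first, then a comprehension mapping each token i to starts[i] + i*gap + len(token)//2 (the gap contribution becomes the closed form i*gap).
import Mathlib
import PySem

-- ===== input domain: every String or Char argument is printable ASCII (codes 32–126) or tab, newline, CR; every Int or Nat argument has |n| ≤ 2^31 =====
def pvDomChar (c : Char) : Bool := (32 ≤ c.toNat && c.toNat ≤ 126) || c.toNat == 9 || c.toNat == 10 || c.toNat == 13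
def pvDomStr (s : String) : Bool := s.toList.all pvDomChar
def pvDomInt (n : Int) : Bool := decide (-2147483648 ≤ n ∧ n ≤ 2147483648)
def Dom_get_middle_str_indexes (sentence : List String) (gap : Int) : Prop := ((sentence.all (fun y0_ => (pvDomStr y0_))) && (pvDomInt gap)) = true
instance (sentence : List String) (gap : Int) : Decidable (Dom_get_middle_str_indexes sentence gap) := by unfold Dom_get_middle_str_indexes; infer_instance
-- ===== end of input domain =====

-- B builds a prefix-offset table of token starts first and then maps over it
-- (gap handled as the closed form i*gap), instead of A's fused running-total loop;
-- objective: alternative decomposition, same cost.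

-- ===== PORT A =====
def pvStepA (gap : Int) (st : Int × List Int) (token : String) : Int × List Int :=
  let mid := PySem.Int.floordiv (token.toList.length : Int) 2
  (st.1 + gap + (token.toList.length : Int), st.2 ++ [st.1 + mid])

def get_middle_str_indexes (sentence : List String) (gap : Int) : List Int :=
  (sentence.foldl (pvStepA gap) (0, [])).2

-- ===== PORT B =====
-- the starts table: starts[i+1] = starts[i] + len(token); acc has length i+1 at
-- step i, so starts[i] is the last element of the accumulator so far
def pvStartsStep (acc : List Int) (token : String) : List Int :=
  acc ++ [acc.getLastD 0 + (token.toList.length : Int)]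

def pvStarts (sentence : List String) : List Int :=
  sentence.foldl pvStartsStep [0]

def get_middle_str_indexes_alt (sentence : List String) (gap : Int) : List Int :=
  let starts := pvStarts sentence
  (PySem.List.enumerate sentence).map
    (fun it => PySem.List.pyGetD starts it.1 0 + it.1 * gap
               + PySem.Int.floordiv ((it.2.toList.length : Int)) 2)

-- ===== PRECONDITION & SPEC =====
def Spec_get_middle_str_indexes (sentence : List String) (gap : Int) (out : List Int) : Prop := out = get_middle_str_indexes_alt sentence gap
instance (sentence : List String) (gap : Int) (out : List Int) : Decidable (Spec_get_middle_str_indexes sentence gap out) := by unfold Spec_get_middle_str_indexes; infer_instance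

-- ===== CLAIM (what is proved, stated in full; the proofs are below) =====
def Claim_equal_get_middle_str_indexes : Prop := ∀ (sentence : List String) (gap : Int), Dom_get_middle_str_indexes sentence gap → Spec_get_middle_str_indexes sentence gap (get_middle_str_indexes sentence gap)

-- ===== LEMMAS AND PROOFS =====

-- sum of the lengths of the tokens
def pvSumLen : List String → Int
  | [] => 0
  | t :: r => (t.toList.length : Int) + pvSumLen r

-- the core sequence A's loop produces from running total t
def pvCore (gap : Int) : List String → Int → List Int
  | [], _ => []
  | t :: r, acc =>
      (acc + PySem.Int.floordiv ((t.toList.length : Int)) 2)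
        :: pvCore gap r (acc + gap + (t.toList.length : Int))

theorem pvA_loop (gap : Int) (s : List String) (t : Int) (out : List Int) :
    (s.foldl (pvStepA gap) (t, out)).2 = out ++ pvCore gap s t := by
  induction s generalizing t out with
  | nil => simp [pvCore]
  | cons x xs ih =>
    rw [List.foldl_cons,
      show pvStepA gap (t, out) x
         = (t + gap + (x.toList.length : Int),
            out ++ [t + PySem.Int.floordiv ((x.toList.length : Int)) 2]) from rfl,
      ih]
    simp [pvCore]

theorem pvCore_length (gap : Int) (s : List String) (t : Int) :
    (pvCore gap s t).length = s.length := by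
  induction s generalizing t with
  | nil => rfl
  | cons x xs ih => simp [pvCore, ih]

theorem pvCore_getElem (gap : Int) (s : List String) (t : Int) (j : Nat) (hj : j < s.length) :
    (pvCore gap s t)[j]'(by rw [pvCore_length]; exact hj)
      = t + (j : Int) * gap + pvSumLen (s.take j)
        + PySem.Int.floordiv ((s[j].toList.length : Int)) 2 := by
  induction s generalizing t j with
  | nil => simp at hj
  | cons x xs ih =>
    cases j with
    | zero => simp [pvCore, pvSumLen]
    | succ k =>
      have hk : k < xs.length := by simpa using hj
      simp only [pvCore, List.getElem_cons_succ, ih _ _ hk, List.take_succ_cons, pvSumLen]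
      push_cast
      ring

theorem pvStarts_spec (s : List String) :
    pvStarts s = (List.range (s.length + 1)).map (fun i => pvSumLen (s.take i)) := by
  induction s using List.reverseRecOn with
  | nil => simp [pvStarts, pvSumLen]
  | append_singleton xs x ih =>
    have hlast : (pvStarts xs).getLastD 0 = pvSumLen xs := by
      rw [ih, List.range_succ, List.map_append]
      simp
    have hsum : ∀ (l : List String) (y : String),
        pvSumLen (l ++ [y]) = pvSumLen l + (y.toList.length : Int) := by
      intro l y
      induction l with
      | nil => simp [pvSumLen]
      | cons a as ihl => simp [pvSumLen, ihl]; ring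
    have hstep : pvStarts (xs ++ [x]) = pvStarts xs ++ [pvSumLen xs + (x.toList.length : Int)] := by
      show List.foldl pvStartsStep [0] (xs ++ [x]) = _
      rw [List.foldl_append]
      show List.foldl pvStartsStep (pvStarts xs) [x] = _
      simp only [pvStartsStep, List.foldl_cons, List.foldl_nil]
      rw [hlast]
    rw [hstep, ih]
    simp only [List.length_append, List.length_singleton]
    conv_rhs => rw [List.range_succ]
    rw [List.map_append]
    congr 1
    · apply List.map_congr_left
      intro i hi
      simp only [List.mem_range] at hi
      rw [List.take_append_of_le_length (by omega)]
    · simp only [List.map_cons, List.map_nil, List.cons.injEq, and_true]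
      rw [List.take_of_length_le (by simp), hsum]

theorem pvStarts_getD (s : List String) (i : Nat) (hi : i ≤ s.length) :
    (pvStarts s).getD i 0 = pvSumLen (s.take i) := by
  rw [pvStarts_spec]
  rw [List.getD_eq_getElem?_getD, List.getElem?_map, List.getElem?_range (by omega)]
  rfl

-- ===== VERDICT (by name: the statement is the Claim_ definition above) =====
theorem get_middle_str_indexes_spec : Claim_equal_get_middle_str_indexes := by
  intro sentence gap _
  show get_middle_str_indexes sentence gap = get_middle_str_indexes_alt sentence gap
  have hA : get_middle_str_indexes sentence gap = pvCore gap sentence 0 := by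
    unfold get_middle_str_indexes
    rw [pvA_loop]
    simp
  rw [hA]
  unfold get_middle_str_indexes_alt
  apply List.ext_getElem
  · simp [pvCore_length, PySem.List.length_enumerate]
  · intro j h1 h2
    have hj : j < sentence.length := by rwa [pvCore_length] at h1
    rw [pvCore_getElem gap sentence 0 j hj]
    rw [List.getElem_map]
    rw [PySem.List.getElem_enumerate]
    simp only [zero_add]
    rw [PySem.List.pyGetD_natCast, pvStarts_getD sentence j (le_of_lt hj)]
    ring
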